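-- pv_equiv track=rewrite | github.com/RAGEN-AI/RAGEN | ragen/env/countdown/env.py | has_solution
-- ===== SOURCE A (Python) =====
-- import itertools
--
-- def has_solution(nums, target):
--     """Check if there is a valid equation using each number exactly once."""
--     # pad nums all to 4 numbers
--     length = 4
--     nums = nums + [0] * (length - len(nums))
--     # +- num1 +- num2 +- num3 +- num4 = target, try all
--     combinations = list(itertools.product([1, -1], repeat=length))
--     for combination in combinations:
--         if sum(combination[i] * nums[i] for i in range(length)) == target:
--             return True
--     return False
-- ===== SOURCE B (Python) =====
-- def has_solution(nums, target):
--     """Check if there is a valid equation using each number exactly once."""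
--     nums = nums + [0] * (4 - len(nums))
--     reachable = {0}
--     for n in nums[:4]:
--         reachable = {s + n for s in reachable} | {s - n for s in reachable}
--     return target in reachable
-- ===== Notes on version B (the rewrite author's own statement) =====
-- stated objective: alternative
-- what changed: Replaces the enumeration of all 16 sign tuples (itertools.product) with a forward fold of the set of reachable signed partial sums, returning a membership test at the end.
import Mathlib
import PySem

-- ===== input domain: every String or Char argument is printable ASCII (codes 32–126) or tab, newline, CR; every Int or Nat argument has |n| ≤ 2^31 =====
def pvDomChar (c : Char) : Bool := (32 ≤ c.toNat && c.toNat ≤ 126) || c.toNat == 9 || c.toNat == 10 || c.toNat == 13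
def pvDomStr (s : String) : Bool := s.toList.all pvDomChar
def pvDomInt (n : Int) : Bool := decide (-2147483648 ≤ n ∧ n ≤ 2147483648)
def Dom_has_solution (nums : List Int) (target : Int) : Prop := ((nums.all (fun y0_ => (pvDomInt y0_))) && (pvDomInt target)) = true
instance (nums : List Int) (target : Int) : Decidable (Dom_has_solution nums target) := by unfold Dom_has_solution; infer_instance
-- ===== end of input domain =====

-- B replaces A's enumeration of all 16 sign tuples (itertools.product) by a forward fold
-- of the set of reachable signed partial sums (objective: alternative algorithm).

-- ===== PORT A =====
-- itertools.product([1, -1], repeat = n): leftmost factor varies slowest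
def pvSigns : Nat → List (List Int)
  | 0 => [[]]
  | n + 1 => [(1 : Int), -1].flatMap (fun s => (pvSigns n).map (fun t => s :: t))

def has_solution (nums : List Int) (target : Int) : Bool :=
  -- Python: nums = nums + [0] * (4 - len(nums))   ([0] * negative = []; Nat subtraction matches)
  let nums2 := nums ++ List.replicate (4 - nums.length) 0
  -- for combination in combinations: if sum(combination[i] * nums[i] for i in range(4)): return True
  -- (pyGetD's default 0 is never used: i ∈ range(4) and both lists have length ≥ 4)
  (pvSigns 4).any (fun c =>
    ((PySem.List.pyRange 0 4 1).foldl
      (fun acc i => acc + PySem.List.pyGetD c i 0 * PySem.List.pyGetD nums2 i 0) 0) == target)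

-- ===== PORT B =====
def has_solution_alt (nums : List Int) (target : Int) : Bool :=
  let nums2 := nums ++ List.replicate (4 - nums.length) 0
  let reachable := (PySem.List.slice nums2 none (some 4)).foldl
    (fun r n => PySem.Set.union (PySem.Set.ofList (r.map (· + n))) (PySem.Set.ofList (r.map (· - n))))
    (PySem.Set.ofList [(0 : Int)])
  PySem.Set.contains reachable target

-- ===== PRECONDITION & SPEC =====
def Spec_has_solution (nums : List Int) (target : Int) (out : Bool) : Prop := out = has_solution_alt nums target
instance (nums : List Int) (target : Int) (out : Bool) : Decidable (Spec_has_solution nums target out) := by unfold Spec_has_solution; infer_instance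

-- ===== CLAIM (what is proved, stated in full; the proofs are below) =====
def Claim_equal_has_solution : Prop := ∀ (nums : List Int) (target : Int), Dom_has_solution nums target → Spec_has_solution nums target (has_solution nums target)

-- ===== LEMMAS AND PROOFS =====

-- signed reachability: pvR xs y t ↔ t is obtainable from y by adding or subtracting the xs in order
def pvR : List Int → Int → Int → Prop
  | [], y, t => t = y
  | n :: xs, y, t => pvR xs (y + n) t ∨ pvR xs (y - n) t

-- characterisation of B's set fold
theorem pvB_char (xs : List Int) (t : Int) (r : PySem.Set Int) :
    PySem.Set.contains
      (xs.foldl (fun r n =>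
        PySem.Set.union (PySem.Set.ofList (r.map (· + n))) (PySem.Set.ofList (r.map (· - n)))) r) t
      = true ↔ ∃ y ∈ r, pvR xs y t := by
  induction xs generalizing r with
  | nil =>
    simp only [List.foldl_nil, PySem.Set.contains_iff, pvR]
    constructor
    · exact fun h => ⟨t, h, rfl⟩
    · rintro ⟨y, hy, rfl⟩; exact hy
  | cons n xs ih =>
    simp only [List.foldl_cons, ih]
    constructor
    · rintro ⟨y, hy, hR⟩
      rw [PySem.Set.mem_union] at hy
      rcases hy with hy | hy <;> rw [PySem.Set.mem_ofList, List.mem_map] at hy <;>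
        obtain ⟨z, hz, rfl⟩ := hy
      · exact ⟨z, hz, Or.inl hR⟩
      · exact ⟨z, hz, Or.inr hR⟩
    · rintro ⟨y, hy, hR | hR⟩
      · exact ⟨y + n, by
          rw [PySem.Set.mem_union, PySem.Set.mem_ofList, List.mem_map]
          exact Or.inl ⟨y, hy, rfl⟩, hR⟩
      · exact ⟨y - n, by
          rw [PySem.Set.mem_union]
          refine Or.inr ?_
          rw [PySem.Set.mem_ofList, List.mem_map]
          exact ⟨y, hy, rfl⟩, hR⟩

set_option maxHeartbeats 1000000 in
-- A's sign enumeration reaches t iff t is a reachable signed sum of the first four entries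
theorem pv_coreA (a b c d t : Int) (rest : List Int) :
    ((pvSigns 4).any (fun c' =>
      ((PySem.List.pyRange 0 4 1).foldl
        (fun acc i => acc + PySem.List.pyGetD c' i 0 * PySem.List.pyGetD (a :: b :: c :: d :: rest) i 0) 0) == t) = true)
    ↔ pvR [a, b, c, d] 0 t := by
  have hrange : PySem.List.pyRange 0 4 1 = [0, 1, 2, 3] := by decide
  have hsigns : pvSigns 4 =
    [[1,1,1,1],[1,1,1,-1],[1,1,-1,1],[1,1,-1,-1],[1,-1,1,1],[1,-1,1,-1],[1,-1,-1,1],[1,-1,-1,-1],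
     [-1,1,1,1],[-1,1,1,-1],[-1,1,-1,1],[-1,1,-1,-1],[-1,-1,1,1],[-1,-1,1,-1],[-1,-1,-1,1],[-1,-1,-1,-1]] := by decide
  have g0 : ∀ (l : List Int) x0, PySem.List.pyGetD (x0::l) (0:Int) 0 = x0 := fun l x0 => by
    rw [PySem.List.pyGetD_ofNat']; rfl
  have g1 : ∀ (l : List Int) x0 x1, PySem.List.pyGetD (x0::x1::l) (1:Int) 0 = x1 := fun l x0 x1 => by
    rw [PySem.List.pyGetD_ofNat']; rfl
  have g2 : ∀ (l : List Int) x0 x1 x2, PySem.List.pyGetD (x0::x1::x2::l) (2:Int) 0 = x2 := fun l x0 x1 x2 => by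
    rw [PySem.List.pyGetD_ofNat']; rfl
  have g3 : ∀ (l : List Int) x0 x1 x2 x3, PySem.List.pyGetD (x0::x1::x2::x3::l) (3:Int) 0 = x3 := fun l x0 x1 x2 x3 => by
    rw [PySem.List.pyGetD_ofNat']; rfl
  rw [hsigns, hrange]
  simp only [List.any_cons, List.any_nil, Bool.or_eq_true, beq_iff_eq, List.foldl,
    g0, g1, g2, g3, Bool.false_eq_true, or_false, pvR]
  constructor
  · intro h
    rcases h with h|h|h|h|h|h|h|h|h|h|h|h|h|h|h|h
    · exact Or.inl (Or.inl (Or.inl (Or.inl ((by omega)))))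
    · exact Or.inl (Or.inl (Or.inl (Or.inr ((by omega)))))
    · exact Or.inl (Or.inl (Or.inr (Or.inl ((by omega)))))
    · exact Or.inl (Or.inl (Or.inr (Or.inr ((by omega)))))
    · exact Or.inl (Or.inr (Or.inl (Or.inl ((by omega)))))
    · exact Or.inl (Or.inr (Or.inl (Or.inr ((by omega)))))
    · exact Or.inl (Or.inr (Or.inr (Or.inl ((by omega)))))
    · exact Or.inl (Or.inr (Or.inr (Or.inr ((by omega)))))
    · exact Or.inr (Or.inl (Or.inl (Or.inl ((by omega)))))
    · exact Or.inr (Or.inl (Or.inl (Or.inr ((by omega)))))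
    · exact Or.inr (Or.inl (Or.inr (Or.inl ((by omega)))))
    · exact Or.inr (Or.inl (Or.inr (Or.inr ((by omega)))))
    · exact Or.inr (Or.inr (Or.inl (Or.inl ((by omega)))))
    · exact Or.inr (Or.inr (Or.inl (Or.inr ((by omega)))))
    · exact Or.inr (Or.inr (Or.inr (Or.inl ((by omega)))))
    · exact Or.inr (Or.inr (Or.inr (Or.inr ((by omega)))))
  · intro h
    rcases h with ((((h|h)|(h|h))|((h|h)|(h|h)))|(((h|h)|(h|h))|((h|h)|(h|h))))
    · exact Or.inl ((by omega))
    · exact Or.inr (Or.inl ((by omega)))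
    · exact Or.inr (Or.inr (Or.inl ((by omega))))
    · exact Or.inr (Or.inr (Or.inr (Or.inl ((by omega)))))
    · exact Or.inr (Or.inr (Or.inr (Or.inr (Or.inl ((by omega))))))
    · exact Or.inr (Or.inr (Or.inr (Or.inr (Or.inr (Or.inl ((by omega)))))))
    · exact Or.inr (Or.inr (Or.inr (Or.inr (Or.inr (Or.inr (Or.inl ((by omega))))))))
    · exact Or.inr (Or.inr (Or.inr (Or.inr (Or.inr (Or.inr (Or.inr (Or.inl ((by omega)))))))))
    · exact Or.inr (Or.inr (Or.inr (Or.inr (Or.inr (Or.inr (Or.inr (Or.inr (Or.inl ((by omega))))))))))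
    · exact Or.inr (Or.inr (Or.inr (Or.inr (Or.inr (Or.inr (Or.inr (Or.inr (Or.inr (Or.inl ((by omega)))))))))))
    · exact Or.inr (Or.inr (Or.inr (Or.inr (Or.inr (Or.inr (Or.inr (Or.inr (Or.inr (Or.inr (Or.inl ((by omega))))))))))))
    · exact Or.inr (Or.inr (Or.inr (Or.inr (Or.inr (Or.inr (Or.inr (Or.inr (Or.inr (Or.inr (Or.inr (Or.inl ((by omega)))))))))))))
    · exact Or.inr (Or.inr (Or.inr (Or.inr (Or.inr (Or.inr (Or.inr (Or.inr (Or.inr (Or.inr (Or.inr (Or.inr (Or.inl ((by omega))))))))))))))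
    · exact Or.inr (Or.inr (Or.inr (Or.inr (Or.inr (Or.inr (Or.inr (Or.inr (Or.inr (Or.inr (Or.inr (Or.inr (Or.inr (Or.inl ((by omega)))))))))))))))
    · exact Or.inr (Or.inr (Or.inr (Or.inr (Or.inr (Or.inr (Or.inr (Or.inr (Or.inr (Or.inr (Or.inr (Or.inr (Or.inr (Or.inr (Or.inl ((by omega))))))))))))))))
    · exact Or.inr (Or.inr (Or.inr (Or.inr (Or.inr (Or.inr (Or.inr (Or.inr (Or.inr (Or.inr (Or.inr (Or.inr (Or.inr (Or.inr (Or.inr ((by omega))))))))))))))))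

-- B's fold over the first four entries reaches t iff t is a reachable signed sum of them
theorem pv_coreB (a b c d t : Int) (rest : List Int) :
    (PySem.Set.contains
      ((PySem.List.slice (a :: b :: c :: d :: rest) none (some 4)).foldl
        (fun r n => PySem.Set.union (PySem.Set.ofList (r.map (· + n))) (PySem.Set.ofList (r.map (· - n))))
        (PySem.Set.ofList [(0 : Int)])) t = true)
    ↔ pvR [a, b, c, d] 0 t := by
  have hslice : PySem.List.slice (a :: b :: c :: d :: rest) none (some 4) = [a, b, c, d] := by
    rw [PySem.List.slice_to _ (by norm_num)]
    rfl
  rw [hslice, pvB_char]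
  constructor
  · rintro ⟨y, hy, hR⟩
    rw [PySem.Set.mem_ofList, List.mem_singleton] at hy
    exact hy ▸ hR
  · intro h
    exact ⟨0, by rw [PySem.Set.mem_ofList]; exact List.mem_singleton.mpr rfl, h⟩

-- the padded list always has the shape a :: b :: c :: d :: rest
theorem pv_pad (nums : List Int) :
    ∃ a b c d rest, nums ++ List.replicate (4 - nums.length) 0 = a :: b :: c :: d :: rest := by
  rcases nums with _ | ⟨a, _ | ⟨b, _ | ⟨c, _ | ⟨d, rest⟩⟩⟩⟩
  · exact ⟨0, 0, 0, 0, [], rfl⟩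
  · exact ⟨a, 0, 0, 0, [], rfl⟩
  · exact ⟨a, b, 0, 0, [], rfl⟩
  · exact ⟨a, b, c, 0, [], rfl⟩
  · exact ⟨a, b, c, d, rest, by simp⟩

-- ===== VERDICT (by name: the statement is the Claim_ definition above) =====
theorem has_solution_spec : Claim_equal_has_solution := by
  intro nums target _
  unfold Spec_has_solution
  show has_solution nums target = has_solution_alt nums target
  obtain ⟨a, b, c, d, rest, hpad⟩ := pv_pad nums
  unfold has_solution has_solution_alt
  rw [Bool.eq_iff_iff]
  rw [hpad]
  rw [pv_coreA, pv_coreB]
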